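-- pv_equiv track=rewrite | github.com/brenuart/LINGE1225 | corrections/Examen_Difficile_CarréAntiMagique.py | estAntiMagique
-- ===== SOURCE A (Python) =====
-- def estAntiMagique(mat):
--     # Vérifie que la matrice est carrée
--     if (len(mat) != len(mat[0])):
--         return False
--
--     somme = [0 for i in range(2*len(mat)+2)]
--
--     # Calcule la somme des diagonales
--     for i in range(len(mat)):
--         somme[2*len(mat)] += mat[i][i]
--         somme[2*len(mat)+1] += mat[i][len(mat)-1-i]
--
--     # Calcule la somme des lignes et des colonnes
--     for i in range(len(mat)):
--         for j in range(len(mat)):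
--             somme[i] += mat[i][j] # ligne i
--             somme[len(mat)+i] += mat[j][i] # colonne i
--
--
--     #Trie le vecteur score de manière croissante
--     temp=0
--     for i in reversed(range(1,len(somme))):
--         for j in range(i):
--             if(somme[j]>somme[j+1]):
--                 temp = somme[j]
--                 somme[j] = somme[j+1]
--                 somme[j+1] = temp
--
--     #Vérifie que le premier élément vaut n
--     if somme[0]!=len(mat):
--         return False
--
--     #Vérifie que le vecteur est bien une suite arithémique de raison 1
--     for i in range(len(somme)-1):
--         if(somme[i]+1 != somme[i+1]):
--             return False
--     return True
-- ===== SOURCE B (Python) =====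
-- def estAntiMagique(mat):
--     n = len(mat)
--     if n != len(mat[0]):
--         return False
--     sums = [sum(row) for row in mat]
--     sums += [sum(col) for col in zip(*mat)]
--     sums.append(sum(mat[i][i] for i in range(n)))
--     sums.append(sum(mat[i][n - 1 - i] for i in range(n)))
--     return set(sums) == set(range(n, 3 * n + 2))
-- ===== Notes on version B (the rewrite author's own statement) =====
-- stated objective: simpler
-- what changed: B computes the 2n+2 sums with comprehensions (sum/zip) and replaces A's hand-written bubble sort plus first-element and consecutive-difference scans by a single set equality with range(n, 3n+2), which holds iff the sums are exactly that arithmetic run; dropping the quadratic bubble sort and the per-element Python loops gives a constant-factor speedup.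
-- outside the precondition, e.g. on estAntiMagique([]): A raises IndexError, B raises IndexError; on estAntiMagique([[0, 2], [3, 4, 99]]): A returns True, B returns False
import Mathlib
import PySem

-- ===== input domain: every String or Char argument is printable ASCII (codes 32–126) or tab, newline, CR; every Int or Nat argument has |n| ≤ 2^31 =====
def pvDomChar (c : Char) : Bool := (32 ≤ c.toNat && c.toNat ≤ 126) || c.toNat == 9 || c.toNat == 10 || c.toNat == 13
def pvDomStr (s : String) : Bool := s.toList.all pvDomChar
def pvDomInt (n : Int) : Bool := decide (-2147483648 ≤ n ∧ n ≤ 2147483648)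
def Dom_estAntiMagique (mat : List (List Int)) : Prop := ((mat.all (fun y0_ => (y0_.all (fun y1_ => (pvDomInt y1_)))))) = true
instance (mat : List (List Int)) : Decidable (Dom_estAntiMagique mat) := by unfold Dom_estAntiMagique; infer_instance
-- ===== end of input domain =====

-- B replaces A's bubble sort + consecutive-difference scan by one set comparison with range(n, 3n+2): simpler.
-- All loop indices in A are nonnegative and (under Pre_) in range, so List.range / List.getD / List.set are
-- exact models of Python's range / indexing / element assignment here.

-- ===== PORT A =====
-- somme[p] += v
def pvAddAt (s : List Int) (p : Nat) (v : Int) : List Int := s.set p (s.getD p 0 + v)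

def estAntiMagique (mat : List (List Int)) : Bool :=
  if mat.length ≠ (mat.headD []).length then false
  else
    let n := mat.length
    let somme0 : List Int := (List.range (2*n+2)).map (fun _ => (0:Int))
    let somme1 := (List.range n).foldl (fun s i =>
      pvAddAt (pvAddAt s (2*n) ((mat.getD i []).getD i 0)) (2*n+1) ((mat.getD i []).getD (n-1-i) 0)) somme0
    let somme2 := (List.range n).foldl (fun s i =>
      (List.range n).foldl (fun s j =>
        pvAddAt (pvAddAt s i ((mat.getD i []).getD j 0)) (n+i) ((mat.getD j []).getD i 0)) s) somme1
    -- bubble sort: for i in reversed(range(1, len(somme))): for j in range(i): conditional swap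
    let somme3 := ((List.range' 1 (somme2.length - 1)).reverse).foldl (fun s i =>
      (List.range i).foldl (fun s j =>
        if s.getD j 0 > s.getD (j+1) 0 then (s.set j (s.getD (j+1) 0)).set (j+1) (s.getD j 0)
        else s) s) somme2
    if somme3.getD 0 0 ≠ (n : Int) then false
    else (List.range (somme3.length - 1)).all (fun i => somme3.getD i 0 + 1 == somme3.getD (i+1) 0)

-- ===== PORT B =====
def estAntiMagique_alt (mat : List (List Int)) : Bool :=
  let n := mat.length
  if n ≠ (mat.headD []).length then false
  else
    let sums := mat.map (fun row => row.sum)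
      ++ (List.range n).map (fun j => (mat.map (fun row => row.getD j 0)).sum)  -- zip(*mat) column sums
      ++ [((List.range n).map (fun i => (mat.getD i []).getD i 0)).sum,
          ((List.range n).map (fun i => (mat.getD i []).getD (n-1-i) 0)).sum]
    PySem.Set.equal (PySem.Set.ofList sums) (PySem.Set.ofList (PySem.List.pyRange (n : Int) (3*(n : Int)+2) 1))

-- ===== PRECONDITION & SPEC =====
-- Pre_ restricts to non-empty matrices that, when the square guard passes, have all rows of the same
-- length: ragged "square-looking" matrices are outside a matrix function's natural domain (rows shorter
-- than n make A raise IndexError; on longer rows A silently ignores the extra entries).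
def Pre_estAntiMagique (mat : List (List Int)) : Prop :=
  mat ≠ [] ∧ ((mat.headD []).length = mat.length → ∀ row ∈ mat, row.length = mat.length)
instance (mat : List (List Int)) : Decidable (Pre_estAntiMagique mat) := by unfold Pre_estAntiMagique; infer_instance
def pvWitness_estAntiMagique : List (List Int) := [[0, 2], [3, 4]]

def Spec_estAntiMagique (mat : List (List Int)) (out : Bool) : Prop := out = estAntiMagique_alt mat
instance (mat : List (List Int)) (out : Bool) : Decidable (Spec_estAntiMagique mat out) := by unfold Spec_estAntiMagique; infer_instance

-- ===== CLAIM (what is proved, stated in full; the proofs are below) =====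
def Claim_equal_estAntiMagique : Prop := ∀ (mat : List (List Int)), Dom_estAntiMagique mat → Pre_estAntiMagique mat → Spec_estAntiMagique mat (estAntiMagique mat)

-- ===== LEMMAS AND PROOFS =====


def pvSwap (s : List Int) (j : Nat) : List Int :=
  if s.getD j 0 > s.getD (j+1) 0 then (s.set j (s.getD (j+1) 0)).set (j+1) (s.getD j 0) else s

def pvBPass : List Int → List Int
  | [] => []
  | [a] => [a]
  | a :: b :: t => if a > b then b :: pvBPass (a :: t) else a :: pvBPass (b :: t)

def pvInner (s : List Int) (i : Nat) : List Int := (List.range i).foldl pvSwap s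

def pvSortDown : List Int → Nat → List Int
  | s, 0 => s
  | s, (k+1) => pvSortDown (pvInner s (k+1)) k

theorem pvSwap_cons (a : Int) (s : List Int) (j : Nat) :
    pvSwap (a :: s) (j+1) = a :: pvSwap s j := by
  simp only [pvSwap, List.getD_cons_succ, List.set_cons_succ]
  split_ifs <;> rfl

theorem foldl_pvSwap_cons (ids : List Nat) (x : Int) (s : List Int) :
    ids.foldl (fun s j => pvSwap s (j+1)) (x :: s) = x :: ids.foldl pvSwap s := by
  induction ids generalizing s with
  | nil => rfl
  | cons j t ih => simp only [List.foldl_cons, pvSwap_cons, ih]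

theorem pvInner_succ (a b : Int) (t : List Int) (i : Nat) :
    pvInner (a :: b :: t) (i+1)
      = (if a > b then b else a) :: pvInner ((if a > b then a else b) :: t) i := by
  unfold pvInner
  rw [List.range_succ_eq_map, List.foldl_cons, List.foldl_map]
  have h0 : pvSwap (a :: b :: t) 0 = (if a > b then b else a) :: (if a > b then a else b) :: t := by
    simp only [pvSwap, List.getD_cons_zero, List.getD_cons_succ]
    split_ifs <;> simp
  rw [h0]
  split_ifs <;> exact foldl_pvSwap_cons _ _ _

theorem pvInner_eq_bpass : ∀ (i : Nat) (s : List Int), i < s.length →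
    pvInner s i = pvBPass (s.take (i+1)) ++ s.drop (i+1) := by
  intro i
  induction i with
  | zero =>
    intro s hs
    match s, hs with
    | a :: t, _ => simp [pvInner, pvBPass]
  | succ i ih =>
    intro s hs
    match s, hs with
    | a :: b :: t, hs =>
      rw [pvInner_succ]
      have hlen : i < ((if a > b then a else b) :: t).length := by
        simp at hs ⊢; omega
      rw [ih _ hlen]
      by_cases hab : a > b <;>
        simp [hab, pvBPass]
    | [a], hs => simp at hs

theorem pvBPass_perm : ∀ (l : List Int), (pvBPass l).Perm l := by
  intro l
  fun_induction pvBPass with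
  | case1 => rfl
  | case2 a => rfl
  | case3 a b t h ih => exact ((ih.cons b).trans (List.Perm.swap a b t)).symm.symm
  | case4 a b t h ih => exact ih.cons a

theorem pvBPass_last : ∀ (l : List Int), l ≠ [] →
    ∃ l' M, pvBPass l = l' ++ [M] ∧ ∀ y ∈ l, y ≤ M := by
  intro l
  fun_induction pvBPass with
  | case1 => intro h; exact absurd rfl h
  | case2 a => intro _; exact ⟨[], a, rfl, by simp⟩
  | case3 a b t h ih =>
    intro _
    obtain ⟨l', M, he, hb⟩ := ih (by simp)
    refine ⟨b :: l', M, by simp [he], ?_⟩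
    intro y hy
    rcases hy with _ | ⟨_, hy⟩
    · exact hb a (by simp)
    · rcases hy with _ | ⟨_, hy⟩
      · exact le_trans (le_of_lt h) (hb a (by simp))
      · exact hb y (by simp; right; exact hy)
  | case4 a b t h ih =>
    intro _
    obtain ⟨l', M, he, hb⟩ := ih (by simp)
    refine ⟨a :: l', M, by simp [he], ?_⟩
    intro y hy
    rcases hy with _ | ⟨_, hy⟩
    · exact le_trans (by omega) (hb b (by simp))
    · exact hb y hy

theorem pvInner_perm (i : Nat) (s : List Int) (h : i < s.length) : (pvInner s i).Perm s := by
  rw [pvInner_eq_bpass i s h]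
  have h1 := (pvBPass_perm (s.take (i+1))).append_right (s.drop (i+1))
  rwa [List.take_append_drop] at h1

theorem length_pvInner (i : Nat) (s : List Int) (h : i < s.length) :
    (pvInner s i).length = s.length := (pvInner_perm i s h).length_eq

theorem foldl_pvInner_eq_sortDown : ∀ (k : Nat) (s : List Int),
    ((List.range' 1 k).reverse).foldl pvInner s = pvSortDown s k := by
  intro k
  induction k with
  | zero => intro s; rfl
  | succ k ih =>
    intro s
    have hr : List.range' 1 (k+1) = List.range' 1 k ++ [k+1] := by
      rw [List.range'_concat]; simp; omega
    rw [hr, List.reverse_append]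
    simp only [List.reverse_cons, List.reverse_nil, List.nil_append, List.foldl_cons,
      List.foldl_append, List.singleton_append]
    rw [ih]
    rfl

theorem pvSortDown_perm : ∀ (k : Nat) (s : List Int), k < s.length → (pvSortDown s k).Perm s := by
  intro k
  induction k with
  | zero => intro s _; rfl
  | succ k ih =>
    intro s h
    have h1 : k + 1 < s.length := h
    have h2 : k < (pvInner s (k+1)).length := by rw [length_pvInner _ _ h1]; omega
    exact (ih _ h2).trans (pvInner_perm _ _ h1)

theorem pvSortDown_sorted : ∀ (k : Nat) (s : List Int), k < s.length →
    (s.drop (k+1)).Sorted (· ≤ ·) →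
    (∀ x ∈ s.take (k+1), ∀ y ∈ s.drop (k+1), x ≤ y) →
    (pvSortDown s k).Sorted (· ≤ ·) := by
  intro k
  induction k with
  | zero =>
    intro s hlen hsorted hbound
    match s, hlen with
    | a :: t, _ =>
      simp only [pvSortDown]
      simp only [List.drop_succ_cons, List.drop_zero] at hsorted
      refine List.sorted_cons.mpr ⟨?_, hsorted⟩
      intro y hy
      exact hbound a (by simp) y (by simpa using hy)
  | succ k ih =>
    intro s hlen hsorted hbound
    show (pvSortDown (pvInner s (k+1)) k).Sorted (· ≤ ·)
    have hk1 : k + 1 < s.length := hlen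
    rw [pvInner_eq_bpass _ _ hk1]
    have htake_ne : s.take (k+2) ≠ [] := by
      have : (s.take (k+2)).length = k+2 := by rw [List.length_take]; omega
      intro h; rw [h] at this; simp at this
    obtain ⟨l', M, he, hM⟩ := pvBPass_last _ htake_ne
    rw [he]
    have hlt : (l' ++ [M]).length = k + 2 := by
      rw [← he, (pvBPass_perm _).length_eq, List.length_take]; omega
    have hl' : l'.length = k + 1 := by simp at hlt; omega
    -- elements of l' ++ [M] are elements of s.take (k+2)
    have hmem : ∀ x ∈ l' ++ [M], x ∈ s.take (k+2) := by
      intro x hx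
      exact ((pvBPass_perm (s.take (k+2))).mem_iff).mp (he ▸ hx)
    have hMmem : M ∈ s.take (k+2) := hmem M (by simp)
    apply ih
    · simp [hl']; omega
    · -- drop (k+1) of l' ++ [M] ++ s.drop (k+2) = M :: s.drop (k+2), sorted
      have hd : (l' ++ [M] ++ s.drop (k+2)).drop (k+1) = M :: s.drop (k+2) := by
        rw [List.append_assoc, List.drop_append_of_le_length (by omega),
          List.drop_eq_nil_of_le (by omega), List.nil_append, List.singleton_append]
      rw [hd]
      refine List.sorted_cons.mpr ⟨?_, hsorted⟩
      intro y hy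
      exact hbound M hMmem y hy
    · intro x hx y hy
      have ht : (l' ++ [M] ++ s.drop (k+2)).take (k+1) = l' := by
        rw [List.append_assoc, List.take_append_of_le_length (by omega),
          List.take_of_length_le (by omega)]
      have hd : (l' ++ [M] ++ s.drop (k+2)).drop (k+1) = M :: s.drop (k+2) := by
        rw [List.append_assoc, List.drop_append_of_le_length (by omega),
          List.drop_eq_nil_of_le (by omega), List.nil_append, List.singleton_append]
      rw [ht] at hx
      rw [hd] at hy
      have hxs : x ∈ s.take (k+2) := hmem x (by simp [hx])
      rcases hy with _ | ⟨_, hy⟩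
      · exact hM x hxs
      · exact hbound x hxs y (by assumption)


def pvRun (s : List Int) (ops : List (Nat × Int)) : List Int :=
  ops.foldl (fun s op => pvAddAt s op.1 op.2) s

theorem length_pvAddAt (s : List Int) (p : Nat) (v : Int) :
    (pvAddAt s p v).length = s.length := List.length_set ..

theorem getD_pvAddAt (s : List Int) (p q : Nat) (v : Int) (hp : p < s.length) :
    (pvAddAt s p v).getD q 0 = if q = p then s.getD q 0 + v else s.getD q 0 := by
  simp only [pvAddAt, List.getD_eq_getElem?_getD, List.getElem?_set]
  by_cases h : q = p
  · simp [h, hp]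
  · have h2 : p ≠ q := fun hh => h hh.symm
    simp [h, h2]

theorem length_pvRun (ops : List (Nat × Int)) (s : List Int) :
    (pvRun s ops).length = s.length := by
  induction ops generalizing s with
  | nil => rfl
  | cons op rest ih => simp only [pvRun, List.foldl_cons] at *; rw [ih, length_pvAddAt]

theorem getD_pvRun (ops : List (Nat × Int)) (s : List Int) (q : Nat)
    (hops : ∀ op ∈ ops, op.1 < s.length) :
    (pvRun s ops).getD q 0
      = s.getD q 0 + ((ops.filter (fun op => op.1 == q)).map Prod.snd).sum := by
  induction ops generalizing s with
  | nil => simp [pvRun]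
  | cons op rest ih =>
    have hp : op.1 < s.length := hops op (by simp)
    have hrest : ∀ o ∈ rest, o.1 < (pvAddAt s op.1 op.2).length := by
      rw [length_pvAddAt]; exact fun o ho => hops o (by simp [ho])
    simp only [pvRun, List.foldl_cons] at *
    rw [ih _ hrest, getD_pvAddAt _ _ _ _ hp, List.filter_cons]
    by_cases h : op.1 = q
    · simp only [h, beq_self_eq_true, if_true, if_pos rfl, List.map_cons, List.sum_cons]
      ring
    · have h2 : ¬ (op.1 == q) = true := by simpa using fun hh => h hh
      have h3 : q ≠ op.1 := fun hh => h hh.symm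
      simp [h2, h3]

theorem pvRun_append (s : List Int) (o1 o2 : List (Nat × Int)) :
    pvRun s (o1 ++ o2) = pvRun (pvRun s o1) o2 := List.foldl_append ..

theorem pvRun_flatMap {α : Type} (l : List α) (h : α → List (Nat × Int)) (s : List Int) :
    pvRun s (l.flatMap h) = l.foldl (fun s a => pvRun s (h a)) s := by
  rw [pvRun, List.foldl_flatMap]; rfl

theorem pv_sum_flatMap {α : Type} (l : List α) (g : α → List Int) :
    (l.flatMap g).sum = (l.map (fun a => (g a).sum)).sum := by
  induction l <;> simp [*]

theorem sum_snd_filter_flatMap {α : Type} (l : List α) (h : α → List (Nat × Int))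
    (f : Nat × Int → Bool) :
    (((l.flatMap h).filter f).map Prod.snd).sum
      = (l.map (fun a => (((h a).filter f).map Prod.snd).sum)).sum := by
  rw [List.filter_flatMap, List.map_flatMap, pv_sum_flatMap]

theorem sum_map_range_single (n q : Nat) (f : Nat → Int) (hq : q < n)
    (h0 : ∀ i < n, i ≠ q → f i = 0) :
    ((List.range n).map f).sum = f q := by
  induction n with
  | zero => omega
  | succ n ih =>
    rw [List.range_succ, List.map_append, List.sum_append]
    by_cases h : q = n
    · have : ((List.range n).map f).sum = 0 := by
        apply List.sum_eq_zero
        intro x hx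
        simp only [List.mem_map, List.mem_range] at hx
        obtain ⟨i, hi, rfl⟩ := hx
        exact h0 i (by omega) (by omega)
      simp [this, h]
    · rw [ih (by omega) (fun i hi hne => h0 i (by omega) hne)]
      simp [h0 n (by omega) (fun hh => h hh.symm)]

theorem map_range_getD {α : Type} (l : List α) (d : α) :
    (List.range l.length).map (fun j => l.getD j d) = l := by
  apply List.ext_getElem
  · simp
  · intro i h1 h2
    simp [List.getD_eq_getElem?_getD, List.getElem?_eq_getElem h2]

def pvDiagOps (mat : List (List Int)) : List (Nat × Int) :=
  (List.range mat.length).flatMap (fun i =>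
    [(2*mat.length, (mat.getD i []).getD i 0),
     (2*mat.length+1, (mat.getD i []).getD (mat.length-1-i) 0)])

def pvRCOps (mat : List (List Int)) : List (Nat × Int) :=
  (List.range mat.length).flatMap (fun i =>
    (List.range mat.length).flatMap (fun j =>
      [(i, (mat.getD i []).getD j 0),
       (mat.length+i, (mat.getD j []).getD i 0)]))

def pvSumsB (mat : List (List Int)) : List Int :=
  mat.map (fun row => row.sum)
    ++ (List.range mat.length).map (fun j => (mat.map (fun row => row.getD j 0)).sum)
    ++ [((List.range mat.length).map (fun i => (mat.getD i []).getD i 0)).sum,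
        ((List.range mat.length).map (fun i => (mat.getD i []).getD (mat.length-1-i) 0)).sum]

theorem filter_pair_sum (p1 p2 q : Nat) (v1 v2 : Int) :
    ((([(p1,v1),(p2,v2)] : List (Nat × Int)).filter (fun op => op.1 == q)).map Prod.snd).sum
      = (if p1 = q then v1 else 0) + (if p2 = q then v2 else 0) := by
  by_cases h1 : p1 = q <;> by_cases h2 : p2 = q <;> simp [List.filter_cons, h1, h2]

theorem getD_zeros (m q : Nat) : ((List.range m).map (fun _ => (0:Int))).getD q 0 = 0 := by
  simp only [List.getD_eq_getElem?_getD, List.getElem?_map]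
  cases (List.range m)[q]? <;> simp

theorem map_range_getD_comp {α β : Type} (l : List α) (d : α) (g : α → β) :
    (List.range l.length).map (fun j => g (l.getD j d)) = l.map g := by
  conv_rhs => rw [← map_range_getD l d]
  rw [List.map_map]
  rfl

theorem eq_of_getD (l1 l2 : List Int) (hl : l1.length = l2.length)
    (h : ∀ i < l1.length, l1.getD i 0 = l2.getD i 0) : l1 = l2 := by
  apply List.ext_getElem hl
  intro i h1 h2
  have := h i h1
  rwa [List.getD_eq_getElem?_getD, List.getD_eq_getElem?_getD,
    List.getElem?_eq_getElem h1, List.getElem?_eq_getElem h2] at this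

theorem getD_map_of_lt {α β : Type} (l : List α) (f : α → β) (q : Nat) (hq : q < l.length)
    (d : β) (d' : α) : (l.map f).getD q d = f (l.getD q d') := by
  simp [List.getD_eq_getElem?_getD, List.getElem?_eq_getElem, hq, List.getElem?_map]

theorem pv_somme2_eq (mat : List (List Int)) (hne : 0 < mat.length)
    (hrect : ∀ row ∈ mat, row.length = mat.length) :
    pvRun ((List.range (2*mat.length+2)).map (fun _ => (0:Int))) (pvDiagOps mat ++ pvRCOps mat)
      = pvSumsB mat := by
  set n := mat.length with hn
  have hops : ∀ op ∈ pvDiagOps mat ++ pvRCOps mat,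
      op.1 < ((List.range (2*n+2)).map (fun _ => (0:Int))).length := by
    intro op hop
    simp only [List.length_map, List.length_range]
    rcases List.mem_append.mp hop with h | h
    · simp only [pvDiagOps, List.mem_flatMap, List.mem_range, List.mem_cons, List.not_mem_nil, or_false] at h
      obtain ⟨i, hi, hop⟩ := h
      rcases hop with h | h <;> subst h <;> simp <;> omega
    · simp only [pvRCOps, List.mem_flatMap, List.mem_range, List.mem_cons, List.not_mem_nil, or_false] at h
      obtain ⟨i, hi, j, hj, hop⟩ := h
      rcases hop with h | h <;> subst h <;> simp <;> omega
  apply eq_of_getD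
  · rw [length_pvRun]
    simp [pvSumsB, ← hn]
    omega
  · intro q hq
    rw [length_pvRun] at hq
    simp only [List.length_map, List.length_range] at hq
    rw [getD_pvRun _ _ _ hops, getD_zeros, List.filter_append, List.map_append, List.sum_append,
      zero_add]
    have hdiag : (((pvDiagOps mat).filter (fun op => op.1 == q)).map Prod.snd).sum
        = ((List.range n).map (fun i =>
            (if 2*n = q then (mat.getD i []).getD i 0 else 0)
            + (if 2*n+1 = q then (mat.getD i []).getD (n-1-i) 0 else 0))).sum := by
      rw [pvDiagOps, sum_snd_filter_flatMap]
      simp only [filter_pair_sum, ← hn]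
    have hrc : (((pvRCOps mat).filter (fun op => op.1 == q)).map Prod.snd).sum
        = ((List.range n).map (fun i => ((List.range n).map (fun j =>
            (if i = q then (mat.getD i []).getD j 0 else 0)
            + (if n+i = q then (mat.getD j []).getD i 0 else 0))).sum)).sum := by
      rw [pvRCOps, sum_snd_filter_flatMap]
      simp only [sum_snd_filter_flatMap, filter_pair_sum, ← hn]
    rw [hdiag, hrc]
    rcases (show q < n ∨ (n ≤ q ∧ q < 2*n) ∨ q = 2*n ∨ q = 2*n+1 by omega) with hc | ⟨hc1, hc2⟩ | hc | hc
    · -- row q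
      have h1 : ((List.range n).map (fun i =>
          (if 2*n = q then (mat.getD i []).getD i 0 else 0)
          + (if 2*n+1 = q then (mat.getD i []).getD (n-1-i) 0 else 0))).sum = 0 := by
        apply List.sum_eq_zero
        intro x hx
        simp only [List.mem_map, List.mem_range] at hx
        obtain ⟨i, hi, rfl⟩ := hx
        rw [if_neg (by omega), if_neg (by omega)]; simp
      have h2 : ((List.range n).map (fun i => ((List.range n).map (fun j =>
          (if i = q then (mat.getD i []).getD j 0 else 0)
          + (if n+i = q then (mat.getD j []).getD i 0 else 0))).sum)).sum
          = (mat.getD q []).sum := by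
        rw [sum_map_range_single n q _ hc]
        · have hrow : (mat.getD q []).length = n := by
            apply hrect
            have : mat.getD q [] = mat[q] := by
              rw [List.getD_eq_getElem?_getD, List.getElem?_eq_getElem (by omega)]; rfl
            rw [this]; exact List.getElem_mem _
          conv_rhs => rw [← map_range_getD (mat.getD q []) 0]
          rw [hrow]
          congr 1
          apply List.map_congr_left
          intro j hj
          rw [if_pos rfl, if_neg (by omega)]
          simp
        · intro i hi hne2
          apply List.sum_eq_zero
          intro x hx
          simp only [List.mem_map, List.mem_range] at hx
          obtain ⟨j, hj, rfl⟩ := hx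
          rw [if_neg hne2, if_neg (by omega)]; simp
      rw [h1, h2, zero_add]
      rw [pvSumsB, List.append_assoc, List.getD_append _ _ _ q (by simp [← hn]; omega),
        getD_map_of_lt mat _ q (by omega) 0 []]
    · -- column q - n
      have h1 : ((List.range n).map (fun i =>
          (if 2*n = q then (mat.getD i []).getD i 0 else 0)
          + (if 2*n+1 = q then (mat.getD i []).getD (n-1-i) 0 else 0))).sum = 0 := by
        apply List.sum_eq_zero
        intro x hx
        simp only [List.mem_map, List.mem_range] at hx
        obtain ⟨i, hi, rfl⟩ := hx
        rw [if_neg (by omega), if_neg (by omega)]; simp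
      have h2 : ((List.range n).map (fun i => ((List.range n).map (fun j =>
          (if i = q then (mat.getD i []).getD j 0 else 0)
          + (if n+i = q then (mat.getD j []).getD i 0 else 0))).sum)).sum
          = (mat.map (fun row => row.getD (q-n) 0)).sum := by
        rw [sum_map_range_single n (q-n) _ (by omega)]
        · conv_rhs => rw [← map_range_getD_comp mat [] (fun row => row.getD (q-n) 0)]
          rw [← hn]
          congr 1
          apply List.map_congr_left
          intro j hj
          rw [if_neg (by omega), if_pos (by omega)]
          simp
        · intro i hi hne2
          apply List.sum_eq_zero
          intro x hx
          simp only [List.mem_map, List.mem_range] at hx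
          obtain ⟨j, hj, rfl⟩ := hx
          rw [if_neg (by omega), if_neg (by omega)]; simp
      rw [h1, h2, zero_add]
      rw [pvSumsB, List.append_assoc, List.getD_append_right _ _ _ q (by simp [← hn]; omega),
        List.getD_append _ _ _ _ (by simp [← hn]; omega)]
      simp only [List.length_map, ← hn]
      rw [getD_map_of_lt (List.range n) _ (q - n) (by simp; omega) 0 0]
      have : (List.range n).getD (q - n) 0 = q - n := by
        rw [List.getD_eq_getElem?_getD, List.getElem?_range (by omega)]
        rfl
      rw [this]
    · -- main diagonal, q = 2n
      subst hc
      have h1 : ((List.range n).map (fun i =>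
          (if 2*n = 2*n then (mat.getD i []).getD i 0 else 0)
          + (if 2*n+1 = 2*n then (mat.getD i []).getD (n-1-i) 0 else 0))).sum
          = ((List.range n).map (fun i => (mat.getD i []).getD i 0)).sum := by
        congr 1
        apply List.map_congr_left
        intro i hi
        rw [if_pos rfl, if_neg (by omega)]
        simp
      have h2 : ((List.range n).map (fun i => ((List.range n).map (fun j =>
          (if i = 2*n then (mat.getD i []).getD j 0 else 0)
          + (if n+i = 2*n then (mat.getD j []).getD i 0 else 0))).sum)).sum = 0 := by
        apply List.sum_eq_zero
        intro x hx
        simp only [List.mem_map, List.mem_range] at hx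
        obtain ⟨i, hi, rfl⟩ := hx
        apply List.sum_eq_zero
        intro y hy
        simp only [List.mem_map, List.mem_range] at hy
        obtain ⟨j, hj, rfl⟩ := hy
        rw [if_neg (by omega), if_neg (by omega)]; simp
      rw [h1, h2, add_zero]
      rw [pvSumsB, List.getD_append_right _ _ _ _ (by simp [← hn]; omega)]
      have : 2*n - (mat.map (fun row => row.sum)
          ++ (List.range mat.length).map (fun j => (mat.map (fun row => row.getD j 0)).sum)).length = 0 := by
        simp [← hn]; omega
      rw [this]
      rfl
    · -- anti-diagonal, q = 2n+1
      subst hc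
      have h1 : ((List.range n).map (fun i =>
          (if 2*n = 2*n+1 then (mat.getD i []).getD i 0 else 0)
          + (if 2*n+1 = 2*n+1 then (mat.getD i []).getD (n-1-i) 0 else 0))).sum
          = ((List.range n).map (fun i => (mat.getD i []).getD (n-1-i) 0)).sum := by
        congr 1
        apply List.map_congr_left
        intro i hi
        rw [if_neg (by omega), if_pos rfl]
        simp
      have h2 : ((List.range n).map (fun i => ((List.range n).map (fun j =>
          (if i = 2*n+1 then (mat.getD i []).getD j 0 else 0)
          + (if n+i = 2*n+1 then (mat.getD j []).getD i 0 else 0))).sum)).sum = 0 := by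
        apply List.sum_eq_zero
        intro x hx
        simp only [List.mem_map, List.mem_range] at hx
        obtain ⟨i, hi, rfl⟩ := hx
        apply List.sum_eq_zero
        intro y hy
        simp only [List.mem_map, List.mem_range] at hy
        obtain ⟨j, hj, rfl⟩ := hy
        rw [if_neg (by omega), if_neg (by omega)]; simp
      rw [h1, h2, add_zero]
      rw [pvSumsB, List.getD_append_right _ _ _ _ (by simp [← hn]; omega)]
      have : 2*n+1 - (mat.map (fun row => row.sum)
          ++ (List.range mat.length).map (fun j => (mat.map (fun row => row.getD j 0)).sum)).length = 1 := by
        simp [← hn]; omega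
      rw [this]
      rfl


def pvTarget (n : Nat) : List Int := PySem.List.pyRange (n : Int) (3*(n : Int)+2) 1

theorem pvTarget_eq (n : Nat) :
    pvTarget n = (List.range (2*n+2)).map (fun k : Nat => (n : Int) + (k : Int)) := by
  rw [pvTarget, PySem.List.pyRange_one]
  have h : ((3*(n:Int)+2) - n).toNat = 2*n+2 := by omega
  rw [h]

theorem length_pvTarget (n : Nat) : (pvTarget n).length = 2*n+2 := by
  rw [pvTarget_eq]; simp

theorem getD_pvTarget (n k : Nat) (hk : k < 2*n+2) :
    (pvTarget n).getD k 0 = (n : Int) + k := by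
  rw [pvTarget_eq, getD_map_of_lt (List.range (2*n+2)) _ k (by simp [hk]) 0 0]
  congr 1
  rw [List.getD_eq_getElem?_getD, List.getElem?_range hk]
  rfl

theorem pv_check_iff (s : List Int) (n : Nat) (hs : s.length = 2*n+2) :
    ((if s.getD 0 0 ≠ (n : Int) then false
      else (List.range (s.length - 1)).all
        (fun i => s.getD i 0 + 1 == s.getD (i+1) 0)) = true)
      ↔ s = pvTarget n := by
  constructor
  · intro h
    by_cases h0 : s.getD 0 0 ≠ (n : Int)
    · rw [if_pos h0] at h; exact absurd h (by simp)
    · rw [if_neg h0] at h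
      push_neg at h0
      rw [List.all_eq_true] at h
      have hall : ∀ i, i < 2*n+1 → s.getD i 0 + 1 = s.getD (i+1) 0 := by
        intro i hi
        have := h i (by rw [List.mem_range, hs]; omega)
        simpa using this
      have key : ∀ k, k < 2*n+2 → s.getD k 0 = (n : Int) + k := by
        intro k
        induction k with
        | zero => intro _; simpa using h0
        | succ k ih =>
          intro hk
          rw [← hall k (by omega), ih (by omega)]
          push_cast; ring
      apply eq_of_getD _ _ (by rw [hs, length_pvTarget])
      intro i hi
      rw [hs] at hi
      rw [key i hi, getD_pvTarget n i hi]
  · intro h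
    subst h
    rw [if_neg (by rw [getD_pvTarget n 0 (by omega)]; simp)]
    rw [List.all_eq_true]
    intro i hi
    rw [length_pvTarget] at hi
    rw [List.mem_range] at hi
    rw [getD_pvTarget n i (by omega), getD_pvTarget n (i+1) (by omega)]
    simp only [beq_iff_eq]
    push_cast; ring

theorem pvTarget_sorted (n : Nat) : (pvTarget n).Pairwise (· ≤ ·) := by
  have := PySem.List.pairwise_lt_pyRange_one (n : Int) (3*(n:Int)+2)
  exact List.Pairwise.imp (fun h => le_of_lt h) this

theorem pvTarget_nodup (n : Nat) : (pvTarget n).Nodup :=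
  PySem.List.nodup_pyRange_one _ _

theorem length_pvSumsB (mat : List (List Int)) : (pvSumsB mat).length = 2*mat.length+2 := by
  simp [pvSumsB]; omega

-- ===== VERDICT (by name: the statement is the Claim_ definition above) =====
theorem estAntiMagique_spec : Claim_equal_estAntiMagique := by
  intro mat _ hpre
  obtain ⟨hne, hrectP⟩ := hpre
  show estAntiMagique mat = estAntiMagique_alt mat
  by_cases hguard : mat.length = (mat.headD []).length
  · -- square guard passes
    set n := mat.length with hn
    have hn0 : 0 < n := List.length_pos_iff.mpr hne
    have hrect : ∀ row ∈ mat, row.length = n := hrectP hguard.symm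
    -- A reduces to the sort-and-scan check on the filled array
    have e1 : estAntiMagique mat
        = (if (pvSortDown (pvSumsB mat) (2*n+1)).getD 0 0 ≠ (n : Int) then false
           else (List.range ((pvSortDown (pvSumsB mat) (2*n+1)).length - 1)).all
             (fun i => (pvSortDown (pvSumsB mat) (2*n+1)).getD i 0 + 1
               == (pvSortDown (pvSumsB mat) (2*n+1)).getD (i+1) 0)) := by
      simp only [estAntiMagique]
      simp only [← hn]
      rw [if_neg (by simpa using hguard)]
      have hsomme2 : (List.range n).foldl (fun s i =>
            (List.range n).foldl (fun s j =>
              pvAddAt (pvAddAt s i ((mat.getD i []).getD j 0))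
                (n+i) ((mat.getD j []).getD i 0)) s)
            ((List.range n).foldl (fun s i =>
              pvAddAt (pvAddAt s (2*n) ((mat.getD i []).getD i 0))
                (2*n+1) ((mat.getD i []).getD (n-1-i) 0))
              ((List.range (2*n+2)).map (fun _ => (0:Int))))
          = pvSumsB mat := by
        have d1 : (List.range n).foldl (fun s i =>
              pvAddAt (pvAddAt s (2*n) ((mat.getD i []).getD i 0))
                (2*n+1) ((mat.getD i []).getD (n-1-i) 0))
              ((List.range (2*n+2)).map (fun _ => (0:Int)))
            = pvRun ((List.range (2*n+2)).map (fun _ => (0:Int))) (pvDiagOps mat) := by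
          rw [pvDiagOps, pvRun_flatMap]
          rfl
        rw [d1]
        have d2 : ∀ s : List Int, (List.range n).foldl (fun s i =>
              (List.range n).foldl (fun s j =>
                pvAddAt (pvAddAt s i ((mat.getD i []).getD j 0))
                  (n+i) ((mat.getD j []).getD i 0)) s) s
            = pvRun s (pvRCOps mat) := by
          intro s
          rw [pvRCOps, pvRun_flatMap]
          simp only [pvRun_flatMap]
          rfl
        rw [d2, ← pvRun_append]
        exact pv_somme2_eq mat hn0 hrect
      rw [hsomme2]
      have hlen2 : (pvSumsB mat).length = 2*n+2 := length_pvSumsB mat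
      have hsort : ((List.range' 1 ((pvSumsB mat).length - 1)).reverse).foldl pvInner (pvSumsB mat)
          = pvSortDown (pvSumsB mat) (2*n+1) := by
        rw [hlen2]
        have : 2*n+2-1 = 2*n+1 := by omega
        rw [this, foldl_pvInner_eq_sortDown]
      rw [← hsort]
      rfl
    have hB : estAntiMagique_alt mat
        = PySem.Set.equal (PySem.Set.ofList (pvSumsB mat)) (PySem.Set.ofList (pvTarget n)) := by
      simp only [estAntiMagique_alt]
      simp only [← hn]
      rw [if_neg (by simpa using hguard)]
      rfl
    rw [e1, hB]
    have hlen2 : (pvSumsB mat).length = 2*n+2 := length_pvSumsB mat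
    have hk : 2*n+1 < (pvSumsB mat).length := by omega
    have hperm : (pvSortDown (pvSumsB mat) (2*n+1)).Perm (pvSumsB mat) :=
      pvSortDown_perm _ _ hk
    have hsorted : (pvSortDown (pvSumsB mat) (2*n+1)).Pairwise (· ≤ ·) := by
      apply pvSortDown_sorted _ _ hk
      · rw [List.drop_eq_nil_of_le (by omega)]
        exact List.Pairwise.nil
      · intro x _ y hy
        rw [List.drop_eq_nil_of_le (by omega)] at hy
        simp at hy
    have hchk := pv_check_iff (pvSortDown (pvSumsB mat) (2*n+1)) n
      (by rw [hperm.length_eq, hlen2])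
    rw [Bool.eq_iff_iff, hchk, PySem.Set.equal_iff]
    constructor
    · intro hEq x
      have hLT : (pvTarget n).Perm (pvSumsB mat) := hEq ▸ hperm
      rw [PySem.Set.mem_ofList, PySem.Set.mem_ofList, ← hLT.mem_iff]
    · intro hmem
      have hTsub : pvTarget n ⊆ pvSortDown (pvSumsB mat) (2*n+1) := by
        intro x hx
        rw [hperm.mem_iff]
        have := hmem x
        rw [PySem.Set.mem_ofList, PySem.Set.mem_ofList] at this
        exact this.mpr hx
      have hsub : (pvTarget n).Subperm (pvSortDown (pvSumsB mat) (2*n+1)) :=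
        (pvTarget_nodup n).subperm hTsub
      have hTperm : (pvTarget n).Perm (pvSortDown (pvSumsB mat) (2*n+1)) :=
        hsub.perm_of_length_le (by rw [hperm.length_eq, hlen2, length_pvTarget])
      exact (List.eq_of_perm_of_sorted (fun a b _ _ h1 h2 => le_antisymm h1 h2)
        hsorted (pvTarget_sorted n) hTperm.symm)
  · -- not square: both guards return false
    rw [estAntiMagique, estAntiMagique_alt]
    rw [if_pos (by simpa using hguard), if_pos (by simpa using hguard)]
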